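-- pv_equiv track=rewrite | github.com/jagriti04/Chanakya-Local-Friend | chanakya/agent/profile_files.py | _split_skill_blocks
-- ===== SOURCE A (Python) =====
-- def _split_skill_blocks(content: str) -> list[tuple[str, str]]:
--     blocks: list[tuple[str, str]] = []
--     current_name = ""
--     current_lines: list[str] = []
--     for raw in content.splitlines():
--         line = raw.rstrip()
--         if line.startswith("## "):
--             if current_name:
--                 blocks.append((current_name, "\n".join(current_lines).strip()))
--             current_name = line[3:].strip()
--             current_lines = []
--             continue
--         if current_name:
--             current_lines.append(line)
--     if current_name:
--         blocks.append((current_name, "\n".join(current_lines).strip()))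
--     return blocks
-- ===== SOURCE B (Python) =====
-- def _drop_to_header(ls):
--     i = 0
--     while i < len(ls) and not ls[i].startswith("## "):
--         i += 1
--     return ls[i:]
--
--
-- def _take_until_header(ls):
--     body = []
--     for l in ls:
--         if l.startswith("## "):
--             break
--         body.append(l)
--     return body
--
--
-- def _split_skill_blocks(content: str) -> list[tuple[str, str]]:
--     lines = [raw.rstrip() for raw in content.splitlines()]
--     ls = _drop_to_header(lines)
--     out: list[tuple[str, str]] = []
--     while ls:
--         name = ls[0][3:].strip()
--         body = _take_until_header(ls[1:])
--         ls = _drop_to_header(ls[1:])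
--         if name:
--             out.append((name, "\n".join(body).strip()))
--     return out
-- ===== Notes on version B (the rewrite author's own statement) =====
-- stated objective: simpler
-- what changed: A's single accumulate-and-flush state machine (current_name/current_lines carried through every line) is replaced by a segment walk: rstrip all lines once, skip to the first header, then repeatedly cut off one header's body and jump to the next header, emitting (name, body) per segment.
import Mathlib
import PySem

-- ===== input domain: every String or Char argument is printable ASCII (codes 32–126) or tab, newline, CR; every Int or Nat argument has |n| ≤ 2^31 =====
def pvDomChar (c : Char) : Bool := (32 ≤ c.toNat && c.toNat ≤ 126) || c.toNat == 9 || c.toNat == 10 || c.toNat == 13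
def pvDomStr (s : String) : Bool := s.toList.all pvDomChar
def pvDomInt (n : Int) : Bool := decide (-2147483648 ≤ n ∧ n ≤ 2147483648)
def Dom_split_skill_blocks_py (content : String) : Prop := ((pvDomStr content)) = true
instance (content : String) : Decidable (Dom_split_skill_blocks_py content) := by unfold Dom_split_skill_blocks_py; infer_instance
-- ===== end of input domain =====

-- B replaces A's accumulate-and-flush state machine by a segment walk (skip to the first
-- header, then repeatedly take one header's body and jump to the next header); objective:
-- a simpler decomposition, same output.

-- ===== PORT A =====
-- one step of A's for-loop; state = (blocks, current_name, current_lines)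
def pvStepA (st : List (String × String) × String × List String) (raw : String) :
    List (String × String) × String × List String :=
  match st with
  | (blocks, current_name, current_lines) =>
    let line := PySem.Str.rstrip raw
    if PySem.Str.startswith line "## " then
      let blocks' := if current_name ≠ "" then
          blocks ++ [(current_name, PySem.Str.strip (PySem.Str.join "\n" current_lines))]
        else blocks
      (blocks', PySem.Str.strip (PySem.Str.slice line (some 3) none), [])
    else if current_name ≠ "" then
      (blocks, current_name, current_lines ++ [line])
    else
      (blocks, current_name, current_lines)

def split_skill_blocks_py (content : String) : List (String × String) :=
  match (PySem.Str.splitlines content).foldl pvStepA ([], "", []) with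
  | (blocks, current_name, current_lines) =>
    if current_name ≠ "" then
      blocks ++ [(current_name, PySem.Str.strip (PySem.Str.join "\n" current_lines))]
    else blocks

-- ===== PORT B =====
def pvIsHeader (l : String) : Bool := PySem.Str.startswith l "## "

-- Source B's _drop_to_header: skip lines until the first header
def pvDropToHeader : List String → List String
  | [] => []
  | l :: t => if pvIsHeader l then l :: t else pvDropToHeader t

-- Source B's _take_until_header: the lines before the next header
def pvTakeUntilHeader : List String → List String
  | [] => []
  | l :: t => if pvIsHeader l then [] else l :: pvTakeUntilHeader t

theorem pvDropToHeader_length_le (ls : List String) : (pvDropToHeader ls).length ≤ ls.length := by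
  induction ls with
  | nil => simp [pvDropToHeader]
  | cons l t ih =>
    rw [pvDropToHeader]
    split
    · simp
    · simp only [List.length_cons]
      omega

-- Source B's while loop: ls starts with a header (or is empty); emit one block per segment
def pvLoopB (ls : List String) (out : List (String × String)) : List (String × String) :=
  match ls with
  | [] => out
  | l :: t =>
    let name := PySem.Str.strip (PySem.Str.slice l (some 3) none)
    let body := pvTakeUntilHeader t
    let rest := pvDropToHeader t
    if name = "" then pvLoopB rest out
    else pvLoopB rest (out ++ [(name, PySem.Str.strip (PySem.Str.join "\n" body))])
termination_by ls.length
decreasing_by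
  all_goals simpa using Nat.lt_succ_of_le (pvDropToHeader_length_le t)

def split_skill_blocks_py_alt (content : String) : List (String × String) :=
  let lines := (PySem.Str.splitlines content).map PySem.Str.rstrip
  pvLoopB (pvDropToHeader lines) []

-- ===== PRECONDITION & SPEC =====
def Spec_split_skill_blocks_py (content : String) (out : List (String × String)) : Prop := out = split_skill_blocks_py_alt content
instance (content : String) (out : List (String × String)) : Decidable (Spec_split_skill_blocks_py content out) := by unfold Spec_split_skill_blocks_py; infer_instance

-- ===== CLAIM (what is proved, stated in full; the proofs are below) =====
def Claim_equal_split_skill_blocks_py : Prop := ∀ (content : String), Dom_split_skill_blocks_py content → Spec_split_skill_blocks_py content (split_skill_blocks_py content)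

-- ===== LEMMAS AND PROOFS =====

-- A's step on an already-rstripped line (pvStepA st raw = pvStepACore st (rstrip raw))
def pvStepACore (st : List (String × String) × String × List String) (line : String) :
    List (String × String) × String × List String :=
  match st with
  | (blocks, current_name, current_lines) =>
    if PySem.Str.startswith line "## " then
      let blocks' := if current_name ≠ "" then
          blocks ++ [(current_name, PySem.Str.strip (PySem.Str.join "\n" current_lines))]
        else blocks
      (blocks', PySem.Str.strip (PySem.Str.slice line (some 3) none), [])
    else if current_name ≠ "" then
      (blocks, current_name, current_lines ++ [line])
    else
      (blocks, current_name, current_lines)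

def pvFlush (n : String) (cs : List String) : List (String × String) :=
  if n = "" then [] else [(n, PySem.Str.strip (PySem.Str.join "\n" cs))]

-- A's final flush, as a function of the loop state
def pvFin (st : List (String × String) × String × List String) : List (String × String) :=
  match st with
  | (b, n, cs) => b ++ pvFlush n cs

theorem pvStepACore_header (b n : _) (cs : List String) (line : String)
    (h : PySem.Str.startswith line "## " = true) :
    pvStepACore (b, n, cs) line =
      (b ++ pvFlush n cs, PySem.Str.strip (PySem.Str.slice line (some 3) none), []) := by
  simp only [pvStepACore, pvFlush, h, if_true]
  split_ifs <;> simp_all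

theorem pvStepACore_other (b n : _) (cs : List String) (line : String)
    (h : PySem.Str.startswith line "## " = false) :
    pvStepACore (b, n, cs) line =
      if n = "" then (b, n, cs) else (b, n, cs ++ [line]) := by
  simp only [pvStepACore, h, Bool.false_eq_true, if_false, ne_eq, ite_not]

theorem pvLoopB_acc_aux : ∀ (k : Nat) (ls : List String), ls.length ≤ k →
    ∀ out, pvLoopB ls out = out ++ pvLoopB ls [] := by
  intro k
  induction k with
  | zero =>
    intro ls h out
    rw [List.length_eq_zero_iff.mp (Nat.le_zero.mp h)]
    simp [pvLoopB]
  | succ k ih =>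
    intro ls h out
    match ls with
    | [] => simp [pvLoopB]
    | l :: t =>
      have ht : (pvDropToHeader t).length ≤ k := by
        have := pvDropToHeader_length_le t
        simp at h; omega
      rw [pvLoopB, pvLoopB]
      split_ifs with hn
      · exact ih _ ht out
      · rw [ih _ ht (out ++ _), ih _ ht ([] ++ _)]
        simp

theorem pvLoopB_acc (ls : List String) (out : List (String × String)) :
    pvLoopB ls out = out ++ pvLoopB ls [] :=
  pvLoopB_acc_aux ls.length ls le_rfl out

-- the invariant connecting A's state machine to B's segment walk
theorem pvMain (ls : List String) (b : List (String × String)) (n : String) (cs : List String) :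
    pvFin (ls.foldl pvStepACore (b, n, cs)) =
      b ++ pvFlush n (cs ++ pvTakeUntilHeader ls) ++ pvLoopB (pvDropToHeader ls) [] := by
  induction ls generalizing b n cs with
  | nil => simp [pvFin, pvTakeUntilHeader, pvDropToHeader, pvLoopB]
  | cons l t ih =>
    by_cases hH : pvIsHeader l = true
    · have hH' : PySem.Str.startswith l "## " = true := hH
      rw [List.foldl_cons, pvStepACore_header _ _ _ _ hH', ih]
      rw [pvTakeUntilHeader, pvDropToHeader]
      simp only [hH, if_true, pvLoopB]
      split_ifs with hn
      · simp [pvFlush, hn]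
      · conv_rhs => rw [pvLoopB_acc]
        simp [pvFlush, hn]
    · have hH' : PySem.Str.startswith l "## " = false := by
        simpa [pvIsHeader] using hH
      rw [List.foldl_cons, pvStepACore_other _ _ _ _ hH']
      rw [pvTakeUntilHeader, pvDropToHeader]
      simp only [hH, Bool.false_eq_true, if_false]
      split_ifs with hn
      · rw [ih]; simp [pvFlush, hn]
      · rw [ih]; simp [pvFlush, hn]

theorem pvFin_eq (st : List (String × String) × String × List String) :
    (match st with
      | (blocks, current_name, current_lines) =>
        if current_name ≠ "" then
          blocks ++ [(current_name, PySem.Str.strip (PySem.Str.join "\n" current_lines))]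
        else blocks) = pvFin st := by
  obtain ⟨b, n, cs⟩ := st
  simp only [pvFin, pvFlush, ne_eq, ite_not]
  split_ifs <;> simp

-- ===== VERDICT (by name: the statement is the Claim_ definition above) =====
theorem split_skill_blocks_py_spec : Claim_equal_split_skill_blocks_py := by
  intro content _
  unfold Spec_split_skill_blocks_py split_skill_blocks_py split_skill_blocks_py_alt
  have hmap : (PySem.Str.splitlines content).foldl pvStepA ([], "", []) =
      ((PySem.Str.splitlines content).map PySem.Str.rstrip).foldl pvStepACore ([], "", []) := by
    rw [List.foldl_map]
    rfl
  rw [hmap, pvFin_eq, pvMain]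
  simp [pvFlush]
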